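-- pv_equiv track=rewrite | github.com/wattyven/AoCSolutions | 2016/Day 02/Day 02.py | getPad
-- ===== SOURCE A (Python) =====
-- def getPad(data):
--     '''create our keypad to start, then navigate our keypad'''
--     pad = [[1,2,3],[4,5,6],[7,8,9]]
--     location = [1,1] # because we start at 5, in the middle of the keypad
--     code = []
--     for line in data:
--         for i in line:
--             if i == 'U':
--                 if location[0] > 0:
--                     location[0] -= 1
--             elif i == 'D':
--                 if location[0] < 2:
--                     location[0] += 1
--             elif i == 'L':
--                 if location[1] > 0:
--                     location[1] -= 1
--             elif i == 'R':
--                 if location[1] < 2: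
--                     location[1] += 1
--         code.append(pad[location[0]][location[1]]) # append the number at the current location
--     return(code)
-- ===== SOURCE B (Python) =====
-- def getPad(data):
--     '''navigate the keypad via a precomputed transition table on the digits'''
--     trans = {
--         1: {'U': 1, 'D': 4, 'L': 1, 'R': 2},
--         2: {'U': 2, 'D': 5, 'L': 1, 'R': 3},
--         3: {'U': 3, 'D': 6, 'L': 2, 'R': 3},
--         4: {'U': 1, 'D': 7, 'L': 4, 'R': 5},
--         5: {'U': 2, 'D': 8, 'L': 4, 'R': 6},
--         6: {'U': 3, 'D': 9, 'L': 5, 'R': 6},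
--         7: {'U': 4, 'D': 7, 'L': 7, 'R': 8},
--         8: {'U': 5, 'D': 8, 'L': 7, 'R': 9},
--         9: {'U': 6, 'D': 9, 'L': 8, 'R': 9},
--     }
--     cur = 5
--     code = []
--     for line in data:
--         for i in line:
--             cur = trans[cur].get(i, cur)
--         code.append(cur)
--     return code
-- ===== Notes on version B (the rewrite author's own statement) =====
-- stated objective: idiomatic
-- what changed: Replaces the mutable [row,col] coordinate pair with nested edge-guarded if/elif branches and a final pad[r][c] lookup by a single current digit and a precomputed transition dict trans[digit][move] with self-loops at edges, stepping via trans[cur].get(i, cur).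
import Mathlib
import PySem

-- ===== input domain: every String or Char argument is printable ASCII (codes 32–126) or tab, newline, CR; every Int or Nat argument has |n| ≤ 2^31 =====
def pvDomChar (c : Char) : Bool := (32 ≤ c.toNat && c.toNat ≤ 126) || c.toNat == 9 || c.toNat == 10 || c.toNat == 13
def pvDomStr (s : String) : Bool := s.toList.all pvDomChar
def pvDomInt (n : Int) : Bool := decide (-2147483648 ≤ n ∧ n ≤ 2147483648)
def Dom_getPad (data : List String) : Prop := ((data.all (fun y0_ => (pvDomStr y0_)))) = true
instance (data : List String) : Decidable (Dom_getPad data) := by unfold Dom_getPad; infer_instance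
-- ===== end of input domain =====

-- B replaces the mutable [row,col] position with a single current digit driven by a
-- precomputed transition dict (idiomatic table-driven rewrite; same cost).


-- ===== PORT A =====
-- the 3×3 keypad literal
def aPad : List (List Int) := [[1,2,3],[4,5,6],[7,8,9]]

-- one character of the inner loop: the if/elif chain mutating location = (row, col)
def aStep (loc : Int × Int) (ch : Char) : Int × Int :=
  if ch == 'U' then (if loc.1 > 0 then (loc.1 - 1, loc.2) else loc)
  else if ch == 'D' then (if loc.1 < 2 then (loc.1 + 1, loc.2) else loc)
  else if ch == 'L' then (if loc.2 > 0 then (loc.1, loc.2 - 1) else loc)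
  else if ch == 'R' then (if loc.2 < 2 then (loc.1, loc.2 + 1) else loc)
  else loc

-- pad[location[0]][location[1]]; the indices are provably always in range (0..2),
-- so the .getD 0 default is never taken
def aPadAt (loc : Int × Int) : Int :=
  ((PySem.List.pyGet? aPad loc.1).bind (fun row => PySem.List.pyGet? row loc.2)).getD 0

def getPad (data : List String) : List Int :=
  (data.foldl
    (fun st line =>
      let loc := line.toList.foldl aStep st.1
      (loc, st.2 ++ [aPadAt loc]))
    ((1, 1), ([] : List Int))).2

-- ===== PORT B =====
-- the transition dict: for each digit, its neighbour under U/D/L/R (self at an edge)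
def bTrans : PySem.Dict Int (PySem.Dict Char Int) := PySem.Dict.mk
  [ (1, PySem.Dict.mk [('U', 1), ('D', 4), ('L', 1), ('R', 2)])
  , (2, PySem.Dict.mk [('U', 2), ('D', 5), ('L', 1), ('R', 3)])
  , (3, PySem.Dict.mk [('U', 3), ('D', 6), ('L', 2), ('R', 3)])
  , (4, PySem.Dict.mk [('U', 1), ('D', 7), ('L', 4), ('R', 5)])
  , (5, PySem.Dict.mk [('U', 2), ('D', 8), ('L', 4), ('R', 6)])
  , (6, PySem.Dict.mk [('U', 3), ('D', 9), ('L', 5), ('R', 6)])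
  , (7, PySem.Dict.mk [('U', 4), ('D', 7), ('L', 7), ('R', 8)])
  , (8, PySem.Dict.mk [('U', 5), ('D', 8), ('L', 7), ('R', 9)])
  , (9, PySem.Dict.mk [('U', 6), ('D', 9), ('L', 8), ('R', 9)]) ]

-- cur = trans[cur].get(i, cur); cur is invariantly a key of trans (1..9), so the
-- none branch (Python's KeyError) is unreachable
def bStep (cur : Int) (ch : Char) : Int :=
  match PySem.Dict.get? bTrans cur with
  | some d => PySem.Dict.getD d ch cur
  | none => cur

def getPad_alt (data : List String) : List Int :=
  (data.foldl
    (fun st line =>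
      let cur := line.toList.foldl bStep st.1
      (cur, st.2 ++ [cur]))
    ((5 : Int), ([] : List Int))).2

-- ===== PRECONDITION & SPEC =====
def Spec_getPad (data : List String) (out : List Int) : Prop := out = getPad_alt data
instance (data : List String) (out : List Int) : Decidable (Spec_getPad data out) := by unfold Spec_getPad; infer_instance

-- ===== CLAIM (what is proved, stated in full; the proofs are below) =====
def Claim_equal_getPad : Prop := ∀ (data : List String), Dom_getPad data → Spec_getPad data (getPad data)

-- ===== LEMMAS AND PROOFS =====

-- the invariant: the location stays on the 3×3 pad
def PadInv (loc : Int × Int) : Prop := 0 ≤ loc.1 ∧ loc.1 ≤ 2 ∧ 0 ≤ loc.2 ∧ loc.2 ≤ 2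

lemma aStep_inv (loc : Int × Int) (ch : Char) (h : PadInv loc) : PadInv (aStep loc ch) := by
  obtain ⟨r, c⟩ := loc
  obtain ⟨h1, h2, h3, h4⟩ := h
  simp only at h1 h2 h3 h4
  unfold aStep PadInv
  split_ifs <;> (try dsimp only) <;> omega

-- a character other than U/D/L/R misses every key of the inner dict, so B keeps cur
lemma bStep_miss (cur : Int) (ch : Char) (h1 : 1 ≤ cur) (h2 : cur ≤ 9)
    (hU : ch ≠ 'U') (hD : ch ≠ 'D') (hL : ch ≠ 'L') (hR : ch ≠ 'R') :
    bStep cur ch = cur := by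
  have eU : ('U' == ch) = false := beq_eq_false_iff_ne.mpr (Ne.symm hU)
  have eD : ('D' == ch) = false := beq_eq_false_iff_ne.mpr (Ne.symm hD)
  have eL : ('L' == ch) = false := beq_eq_false_iff_ne.mpr (Ne.symm hL)
  have eR : ('R' == ch) = false := beq_eq_false_iff_ne.mpr (Ne.symm hR)
  interval_cases cur <;>
    simp [bStep, bTrans, PySem.Dict.get?, PySem.Dict.getD, List.find?, eU, eD, eL, eR]

-- A's digit at (r,c) is 3r+c+1, and one B step on that digit is one A step on (r,c)
lemma step_corr (loc : Int × Int) (ch : Char) (h : PadInv loc) :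
    bStep (3 * loc.1 + loc.2 + 1) ch
      = 3 * (aStep loc ch).1 + (aStep loc ch).2 + 1 := by
  obtain ⟨r, c⟩ := loc
  obtain ⟨h1, h2, h3, h4⟩ := h
  simp only at h1 h2 h3 h4
  interval_cases r <;> interval_cases c <;>
    · by_cases hU : ch = 'U'
      · subst hU; decide
      by_cases hD : ch = 'D'
      · subst hD; decide
      by_cases hL : ch = 'L'
      · subst hL; decide
      by_cases hR : ch = 'R'
      · subst hR; decide
      rw [bStep_miss _ _ (by norm_num) (by norm_num) hU hD hL hR]
      simp [aStep, beq_iff_eq, hU, hD, hL, hR]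

lemma aPadAt_eq (loc : Int × Int) (h : PadInv loc) :
    aPadAt loc = 3 * loc.1 + loc.2 + 1 := by
  obtain ⟨r, c⟩ := loc
  obtain ⟨h1, h2, h3, h4⟩ := h
  simp only at h1 h2 h3 h4
  interval_cases r <;> interval_cases c <;> decide

lemma inner_corr (cs : List Char) (loc : Int × Int) (h : PadInv loc) :
    PadInv (cs.foldl aStep loc) ∧
      cs.foldl bStep (3 * loc.1 + loc.2 + 1)
        = 3 * (cs.foldl aStep loc).1 + (cs.foldl aStep loc).2 + 1 := by
  induction cs generalizing loc with
  | nil => exact ⟨h, rfl⟩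
  | cons ch cs ih =>
    have h' := aStep_inv loc ch h
    simpa [List.foldl_cons, step_corr loc ch h] using ih (aStep loc ch) h'

lemma outer_corr (lines : List String) (loc : Int × Int) (acc : List Int) (h : PadInv loc) :
    (lines.foldl
      (fun st line =>
        let l := line.toList.foldl aStep st.1
        (l, st.2 ++ [aPadAt l])) (loc, acc)).2
    = (lines.foldl
      (fun st line =>
        let cur := line.toList.foldl bStep st.1
        (cur, st.2 ++ [cur])) (3 * loc.1 + loc.2 + 1, acc)).2 := by
  induction lines generalizing loc acc with
  | nil => rfl
  | cons line rest ih =>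
    obtain ⟨hinv, hval⟩ := inner_corr line.toList loc h
    simp only [List.foldl_cons, hval, aPadAt_eq _ hinv]
    exact ih _ _ hinv

-- ===== VERDICT (by name: the statement is the Claim_ definition above) =====
theorem getPad_spec : Claim_equal_getPad := by
  intro data _
  unfold Spec_getPad getPad getPad_alt
  exact outer_corr data (1, 1) [] ⟨by norm_num, by norm_num, by norm_num, by norm_num⟩
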